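-- pv_equiv track=rewrite | github.com/ZakiAbdelwahed/default-credit-api-deploiement | utilities.py | create_feature_mapping
-- ===== SOURCE A (Python) =====
-- from typing import List, Dict
--
-- def create_feature_mapping(
--     original_features: List[str], transformed_features: List[str]
-- ) -> Dict[str, List[int]]:
--     """
--     Crée un mapping entre variables originales et leurs indices dans les variables transformées.
--
--     Paramètres:
--         original_features: Liste des noms des variables originales
--         transformed_features: Liste des noms des variables transformées
--
--     Retourne:
--         Dictionnaire mappant chaque variable originale à ses indices transformés
--     """
--     mapping = {}
--     for orig_feature in original_features:
--         # Trouver toutes les colonnes transformées qui correspondent à cette variable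
--         matching_cols = []
--         for i, trans_feature in enumerate(transformed_features):
--             # Convertir trans_feature en string pour éviter l'erreur TypeError
--             trans_feature_str = str(trans_feature)
--             # Adapter les patterns selon votre encodage
--             if orig_feature in trans_feature_str:
--                 matching_cols.append(i)
--         mapping[orig_feature] = matching_cols
--     return mapping
-- ===== SOURCE B (Python) =====
-- def create_feature_mapping(original_features, transformed_features):
--     # Substring-set index: precompute the set of all substrings of each transformed
--     # feature once, then answer every original feature by set lookups instead of
--     # running a substring search per (original, transformed) pair.
--     index = []
--     for trans_feature in transformed_features:
--         t = str(trans_feature)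
--         index.append({t[a:b] for a in range(len(t) + 1) for b in range(a, len(t) + 1)})
--     mapping = {}
--     for orig_feature in original_features:
--         if orig_feature not in mapping:
--             mapping[orig_feature] = [i for i, subs in enumerate(index) if orig_feature in subs]
--     return mapping
-- ===== Notes on version B (the rewrite author's own statement) =====
-- stated objective: alternative
-- what changed: A runs a substring search over every transformed feature for every original feature; B builds, in one preprocessing pass, the set of all substrings of each transformed feature and then answers each (deduplicated) original feature by pure set-membership lookups, with no substring matching at query time.
import Mathlib
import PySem

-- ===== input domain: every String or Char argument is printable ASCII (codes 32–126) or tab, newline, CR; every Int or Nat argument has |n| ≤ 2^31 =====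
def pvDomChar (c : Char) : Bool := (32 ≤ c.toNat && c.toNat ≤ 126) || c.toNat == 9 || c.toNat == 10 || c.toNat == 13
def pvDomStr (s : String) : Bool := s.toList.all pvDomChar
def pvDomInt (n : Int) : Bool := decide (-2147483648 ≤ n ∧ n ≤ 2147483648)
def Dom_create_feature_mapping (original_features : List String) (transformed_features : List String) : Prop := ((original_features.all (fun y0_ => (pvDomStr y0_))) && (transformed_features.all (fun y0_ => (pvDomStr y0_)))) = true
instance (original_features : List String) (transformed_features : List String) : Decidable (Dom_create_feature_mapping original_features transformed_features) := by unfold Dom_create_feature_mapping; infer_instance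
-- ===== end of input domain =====

-- B replaces A's per-pair substring searches by a precomputed substring-set index:
-- one preprocessing pass stores every substring of each transformed feature in a set,
-- and each original feature is then answered by set lookups only (objective: alternative).

-- ===== PORT A =====
-- for each original feature, scan all transformed features collecting the indices
-- where a substring search succeeds, then insert the list (overwrite on duplicates)
def create_feature_mapping (original_features : List String) (transformed_features : List String) : List (String × List Int) :=
  (original_features.foldl
    (fun (mapping : PySem.Dict String (List Int)) orig_feature =>
      mapping.insert orig_feature
        ((PySem.List.enumerate transformed_features 0).foldl
          (fun matching_cols p =>
            if PySem.Str.isIn orig_feature p.2 then matching_cols ++ [p.1] else matching_cols)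
          ([] : List Int)))
    PySem.Dict.empty).items

-- ===== PORT B =====
-- {t[a:b] for a in range(len(t)+1) for b in range(a, len(t)+1)}
def pvSubstrSet (t : String) : PySem.Set String :=
  (PySem.List.pyRange 0 (PySem.Str.len t + 1) 1).foldl
    (fun s a =>
      (PySem.List.pyRange a (PySem.Str.len t + 1) 1).foldl
        (fun s b => PySem.Set.add s (PySem.Str.slice t (some a) (some b))) s)
    PySem.Set.empty

def create_feature_mapping_alt (original_features : List String) (transformed_features : List String) : List (String × List Int) :=
  let index := transformed_features.foldl
    (fun (idx : List (PySem.Set String)) trans_feature => idx ++ [pvSubstrSet trans_feature]) []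
  (original_features.foldl
    (fun (mapping : PySem.Dict String (List Int)) orig_feature =>
      if mapping.contains orig_feature then mapping
      else mapping.insert orig_feature
        (((PySem.List.enumerate index 0).filter
            (fun p => PySem.Set.contains p.2 orig_feature)).map (fun p => p.1)))
    PySem.Dict.empty).items

-- ===== PRECONDITION & SPEC =====
def Spec_create_feature_mapping (original_features : List String) (transformed_features : List String) (out : List (String × List Int)) : Prop := out = create_feature_mapping_alt original_features transformed_features
instance (original_features : List String) (transformed_features : List String) (out : List (String × List Int)) : Decidable (Spec_create_feature_mapping original_features transformed_features out) := by unfold Spec_create_feature_mapping; infer_instance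

-- ===== CLAIM (what is proved, stated in full; the proofs are below) =====
def Claim_equal_create_feature_mapping : Prop := ∀ (original_features : List String) (transformed_features : List String), Dom_create_feature_mapping original_features transformed_features → Spec_create_feature_mapping original_features transformed_features (create_feature_mapping original_features transformed_features)

-- ===== LEMMAS AND PROOFS =====

-- first components of a key-indexed pair list
theorem pv_map_fst_pairs {ν : Type} (g : String → ν) (l : List String) :
    List.map (fun x => x.1) (List.map (fun k => (k, g k)) l) = l := by
  induction l with
  | nil => rfl
  | cons a t ih => simp [ih]

-- A fold inserting a key-determined value g k, started on a dict representing l,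
-- produces the dict representing the ordered-dedup extension of l by os.
theorem pv_foldl_insert_keyfun (g : String → List Int) :
    ∀ (os : List String) (d : PySem.Dict String (List Int)) (l : List String),
      l.Nodup → d.items = l.map (fun k => (k, g k)) →
      (os.foldl (fun m k => m.insert k (g k)) d).items
        = (os.foldl PySem.Set.add l).map (fun k => (k, g k)) := by
  intro os
  induction os with
  | nil => intro d l _ h; simpa using h
  | cons k os ih =>
    intro d l hnd hitems
    have hkeys : d.keys = l := by
      show List.map (fun x => x.1) d.items = l
      rw [hitems]; exact pv_map_fst_pairs g l
    by_cases hk : k ∈ l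
    · have hc : d.contains k = true := (PySem.Dict.contains_iff_mem_keys d k).2 (hkeys ▸ hk)
      have hadd : PySem.Set.add l k = l := by
        simp [PySem.Set.add, PySem.Set.contains, hk]
      have hitems' : (d.insert k (g k)).items = l.map (fun j => (j, g j)) := by
        rw [PySem.Dict.items_insert_of_contains d _ hc, hitems, List.map_map]
        apply List.map_congr_left
        intro j hj
        by_cases hjk : j = k
        · subst hjk; simp
        · simp [hjk]
      simpa [hadd] using ih (d.insert k (g k)) l hnd hitems'
    · have hc : d.contains k = false := by
        cases h : d.contains k with
        | false => rfl
        | true => exact absurd (hkeys ▸ (PySem.Dict.contains_iff_mem_keys d k).1 h) hk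
      have hadd : PySem.Set.add l k = l ++ [k] := by
        simp [PySem.Set.add, PySem.Set.contains, hk]
      have hitems' : (d.insert k (g k)).items = (l ++ [k]).map (fun j => (j, g j)) := by
        rw [PySem.Dict.items_insert_of_not_contains d _ hc, hitems]; simp
      have hnd' : (l ++ [k]).Nodup := by
        simp [List.nodup_append, hnd]
        intro a ha hak
        exact hk (hak ▸ ha)
      simpa [hadd] using ih (d.insert k (g k)) (l ++ [k]) hnd' hitems'

-- B's guarded fold ('if key not in mapping: insert g k') produces the same
-- ordered-dedup key list with the key-determined values.
theorem pv_foldl_guard_insert_keyfun (g : String → List Int) :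
    ∀ (os : List String) (d : PySem.Dict String (List Int)) (l : List String),
      l.Nodup → d.items = l.map (fun k => (k, g k)) →
      (os.foldl (fun m k => if m.contains k then m else m.insert k (g k)) d).items
        = (os.foldl PySem.Set.add l).map (fun k => (k, g k)) := by
  intro os
  induction os with
  | nil => intro d l _ h; simpa using h
  | cons k os ih =>
    intro d l hnd hitems
    have hkeys : d.keys = l := by
      show List.map (fun x => x.1) d.items = l
      rw [hitems]; exact pv_map_fst_pairs g l
    by_cases hk : k ∈ l
    · have hc : d.contains k = true := (PySem.Dict.contains_iff_mem_keys d k).2 (hkeys ▸ hk)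
      have hadd : PySem.Set.add l k = l := by
        simp [PySem.Set.add, PySem.Set.contains, hk]
      simp only [List.foldl_cons]
      rw [if_pos hc, hadd]
      exact ih d l hnd hitems
    · have hc : d.contains k = false := by
        cases h : d.contains k with
        | false => rfl
        | true => exact absurd (hkeys ▸ (PySem.Dict.contains_iff_mem_keys d k).1 h) hk
      have hadd : PySem.Set.add l k = l ++ [k] := by
        simp [PySem.Set.add, PySem.Set.contains, hk]
      have hitems' : (d.insert k (g k)).items = (l ++ [k]).map (fun j => (j, g j)) := by
        rw [PySem.Dict.items_insert_of_not_contains d _ hc, hitems]; simp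
      have hnd' : (l ++ [k]).Nodup := by
        simp [List.nodup_append, hnd]
        intro a ha hak
        exact hk (hak ▸ ha)
      simp only [List.foldl_cons]
      rw [if_neg (by simp [hc]), hadd]
      exact ih (d.insert k (g k)) (l ++ [k]) hnd' hitems'

-- membership in a fold of Set.add over a list (inner comprehension loop)
theorem pv_mem_foldl_add (f : Int → String) (x : String) :
    ∀ (l : List Int) (s : PySem.Set String),
      (x ∈ l.foldl (fun s b => PySem.Set.add s (f b)) s) ↔ x ∈ s ∨ ∃ b ∈ l, x = f b := by
  intro l
  induction l with
  | nil => simp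
  | cons b l ih =>
    intro s
    rw [List.foldl_cons, ih, PySem.Set.mem_add]
    constructor
    · rintro (⟨h | h⟩ | ⟨c, hc, hx⟩)
      · exact Or.inl h
      · exact Or.inr ⟨b, by simp, h⟩
      · exact Or.inr ⟨c, by simp [hc], hx⟩
    · rintro (h | ⟨c, hc, hx⟩)
      · exact Or.inl (Or.inl h)
      · rcases List.mem_cons.1 hc with rfl | hc
        · exact Or.inl (Or.inr hx)
        · exact Or.inr ⟨c, hc, hx⟩

-- membership in the nested comprehension fold
theorem pv_mem_foldl_add2 (f : Int → Int → String) (r : Int → List Int) (x : String) :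
    ∀ (l : List Int) (s : PySem.Set String),
      (x ∈ l.foldl (fun s a => (r a).foldl (fun s b => PySem.Set.add s (f a b)) s) s) ↔
        x ∈ s ∨ ∃ a ∈ l, ∃ b ∈ r a, x = f a b := by
  intro l
  induction l with
  | nil => simp
  | cons a l ih =>
    intro s
    rw [List.foldl_cons, ih, pv_mem_foldl_add]
    constructor
    · rintro (⟨h | ⟨b, hb, hx⟩⟩ | ⟨c, hc, hrest⟩)
      · exact Or.inl h
      · exact Or.inr ⟨a, by simp, b, hb, hx⟩
      · exact Or.inr ⟨c, by simp [hc], hrest⟩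
    · rintro (h | ⟨c, hc, hrest⟩)
      · exact Or.inl (Or.inl h)
      · rcases List.mem_cons.1 hc with rfl | hc
        · exact Or.inl (Or.inr hrest)
        · exact Or.inr ⟨c, hc, hrest⟩

-- the substring-set index answers exactly the substring ('in') test
theorem pv_substrSet_contains (k t : String) :
    PySem.Set.contains (pvSubstrSet t) k = PySem.Str.isIn k t := by
  have hmem : k ∈ pvSubstrSet t ↔ PySem.Str.isIn k t = true := by
    rw [pvSubstrSet, pv_mem_foldl_add2, PySem.Str.isIn_iff_infix]
    constructor
    · rintro (h | ⟨a, ha, b, hb, hx⟩)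
      · simp [PySem.Set.empty] at h
      · rw [PySem.List.mem_pyRange_one] at ha hb
        subst hx
        have h0a : 0 ≤ a := ha.1
        have h0b : 0 ≤ b := le_trans h0a hb.1
        rw [PySem.Str.toList_slice, PySem.Chars.slice_eq_listSlice,
          PySem.List.slice_toNat _ h0a h0b]
        exact ((List.take_prefix _ _).isInfix).trans ((List.drop_suffix _ _).isInfix)
    · rintro ⟨pre, suf, h⟩
      refine Or.inr ⟨(pre.length : Int), ?_, ((pre.length + k.toList.length : Nat) : Int), ?_, ?_⟩
      · rw [PySem.List.mem_pyRange_one]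
        have : pre.length ≤ t.toList.length := by rw [← h]; simp only [List.length_append]; omega
        constructor
        · exact Int.natCast_nonneg _
        · have hlen : (PySem.Str.len t) = (t.toList.length : Int) := by
            simp [PySem.Str.len]
          omega
      · rw [PySem.List.mem_pyRange_one]
        have : pre.length + k.toList.length ≤ t.toList.length := by rw [← h]; simp only [List.length_append]; omega
        have hlen : (PySem.Str.len t) = (t.toList.length : Int) := by
          simp [PySem.Str.len]
        constructor
        · push_cast; omega
        · push_cast; omega
      · rw [← String.toList_inj, PySem.Str.toList_slice, PySem.Chars.slice_eq_listSlice,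
          PySem.List.slice_toNat _ (Int.natCast_nonneg _) (Int.natCast_nonneg _)]
        rw [Int.toNat_natCast, Int.toNat_natCast]
        rw [Nat.add_sub_cancel_left, ← h, List.append_assoc, List.drop_left, List.take_left]
  cases hin : PySem.Str.isIn k t with
  | true => exact (PySem.Set.contains_iff _ _).2 (hmem.2 hin)
  | false =>
    cases hc : PySem.Set.contains (pvSubstrSet t) k with
    | false => rfl
    | true =>
      have hh := hmem.1 ((PySem.Set.contains_iff _ _).1 hc)
      rw [hin] at hh
      simp at hh

-- enumerate commutes with map
theorem pv_enumerate_map {α β : Type} (f : α → β) (l : List α) :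
    ∀ s : Int, PySem.List.enumerate (l.map f) s
      = (PySem.List.enumerate l s).map (fun p => (p.1, f p.2)) := by
  induction l with
  | nil => intro s; simp [PySem.List.enumerate_nil]
  | cons x l ih => intro s; simp [PySem.List.enumerate_cons, ih]

-- the two per-key value computations agree
theorem pv_values_eq (ts : List String) (k : String) :
    (PySem.List.enumerate ts 0).foldl
        (fun acc p => if PySem.Str.isIn k p.2 then acc ++ [p.1] else acc) ([] : List Int)
      = ((PySem.List.enumerate (ts.map pvSubstrSet) 0).filter
          (fun p => PySem.Set.contains p.2 k)).map (fun p => p.1) := by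
  have h1 := PySem.List.foldl_append_if (fun (p : Int × String) => PySem.Str.isIn k p.2)
    (fun p => p.1) (PySem.List.enumerate ts 0) []
  simp only [] at h1
  rw [h1, pv_enumerate_map, List.filter_map, List.map_map]
  simp only [Function.comp_def, List.nil_append]
  congr 1
  apply List.filter_congr
  intro p _
  have h2 := pv_substrSet_contains k p.2
  simpa using h2.symm

theorem create_feature_mapping_eq (original_features transformed_features : List String) :
    create_feature_mapping original_features transformed_features
      = create_feature_mapping_alt original_features transformed_features := by
  have hindex : transformed_features.foldl
      (fun (idx : List (PySem.Set String)) t => idx ++ [pvSubstrSet t]) []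
      = transformed_features.map pvSubstrSet := by
    simpa using PySem.List.foldl_append_singleton_eq_map pvSubstrSet transformed_features []
  rw [create_feature_mapping, create_feature_mapping_alt]
  rw [pv_foldl_insert_keyfun _ original_features PySem.Dict.empty [] (by simp) (by rfl)]
  simp only [hindex]
  rw [pv_foldl_guard_insert_keyfun _ original_features PySem.Dict.empty [] (by simp) (by rfl)]
  apply List.map_congr_left
  intro k _
  exact congrArg (fun v => (k, v)) (pv_values_eq transformed_features k)

-- ===== VERDICT (by name: the statement is the Claim_ definition above) =====
theorem create_feature_mapping_spec : Claim_equal_create_feature_mapping := by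
  intro os ts _
  unfold Spec_create_feature_mapping
  exact create_feature_mapping_eq os ts
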